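-- pv_equiv track=rewrite | github.com/AStrangePotato/Tetrio-Bot | main.py | lowestBlocks
-- ===== SOURCE A (Python) =====
-- def lowestBlocks(piece):
--     lowestBlocks = []
--
--     columns = []
--     for i in range(len(piece[0])):
--         columns.append([row[i] for row in piece])
--
--     for c in range(len(columns)):
--         for lowest in range(len(columns[c])-1,-1,-1): #start from the bottom and go up until non empty tile is found
--             if piece[lowest][c] != 0:
--                 lowestBlocks.append([lowest, c])
--                 break
--
--     return lowestBlocks
-- ===== SOURCE B (Python) =====
-- def lowestBlocks(piece):
--     lowest = {}
--     for r, row in enumerate(piece):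
--         for c, v in enumerate(row):
--             if v != 0:
--                 lowest[c] = r
--     return [[lowest[c], c] for c in range(len(piece[0])) if c in lowest]
-- ===== Notes on version B (the rewrite author's own statement) =====
-- stated objective: alternative
-- what changed: Replaces A's column-list construction plus per-column bottom-up scan-with-break by one row-major forward sweep that records the bottom-most non-zero row per column in a dict (overwriting), then emits columns in ascending order.
import Mathlib
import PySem

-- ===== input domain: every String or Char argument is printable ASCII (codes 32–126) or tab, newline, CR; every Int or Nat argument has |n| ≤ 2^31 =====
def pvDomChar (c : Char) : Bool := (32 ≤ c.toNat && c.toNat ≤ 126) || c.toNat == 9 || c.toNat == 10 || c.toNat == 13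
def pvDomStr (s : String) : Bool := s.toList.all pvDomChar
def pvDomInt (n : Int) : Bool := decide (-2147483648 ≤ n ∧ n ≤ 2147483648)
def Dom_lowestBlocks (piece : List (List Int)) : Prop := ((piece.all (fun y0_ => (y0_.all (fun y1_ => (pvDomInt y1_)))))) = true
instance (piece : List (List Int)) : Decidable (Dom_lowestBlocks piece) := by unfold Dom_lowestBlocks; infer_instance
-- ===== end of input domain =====

-- B replaces A's column-list construction plus per-column bottom-up scan-with-break by a
-- single row-major sweep recording the bottom-most non-zero row per column in a dict
-- (same asymptotic cost; alternative decomposition). Return-value equivalence only.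

-- ===== PORT A =====
-- the inner 'for lowest in range(len(columns[c])-1,-1,-1): if ...: append; break' loop,
-- as structural recursion over the countdown range (break = stop recursing)
def lowestLoop (piece : List (List Int)) (c : Int) (acc : List (List Int)) :
    List Int → List (List Int)
  | [] => acc
  | lowest :: rest =>
      if PySem.List.pyGetD (PySem.List.pyGetD piece lowest []) c 0 != 0
      then acc ++ [[lowest, c]]
      else lowestLoop piece c acc rest

def lowestBlocks (piece : List (List Int)) : List (List Int) :=
  let columns := (PySem.List.pyRange 0 ((PySem.List.pyGetD piece 0 []).length : Int) 1).map
      (fun i => piece.map (fun row => PySem.List.pyGetD row i 0))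
  (PySem.List.pyRange 0 (columns.length : Int) 1).foldl (fun acc c =>
    lowestLoop piece c acc
      (PySem.List.pyRange (((PySem.List.pyGetD columns c []).length : Int) - 1) (-1) (-1))) []

-- ===== PORT B =====
def lowestBlocks_alt (piece : List (List Int)) : List (List Int) :=
  let d := (PySem.List.enumerate piece 0).foldl (fun d rr =>
      (PySem.List.enumerate rr.2 0).foldl (fun d cv =>
        if cv.2 ≠ 0 then d.insert cv.1 rr.1 else d) d) PySem.Dict.empty
  (PySem.List.pyRange 0 ((PySem.List.pyGetD piece 0 []).length : Int) 1).filterMap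
    (fun c => (d.get? c).map (fun r => [r, c]))

-- ===== PRECONDITION & SPEC =====
-- A raises IndexError on an empty piece (piece[0]) and when some row is shorter than the first row.
def Pre_lowestBlocks (piece : List (List Int)) : Prop :=
  piece ≠ [] ∧ ∀ row ∈ piece, (PySem.List.pyGetD piece 0 []).length ≤ row.length
instance (piece : List (List Int)) : Decidable (Pre_lowestBlocks piece) := by
  unfold Pre_lowestBlocks; infer_instance
def pvWitness_lowestBlocks : List (List Int) := [[0, 1], [2, 0]]

def Spec_lowestBlocks (piece : List (List Int)) (out : List (List Int)) : Prop := out = lowestBlocks_alt piece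
instance (piece : List (List Int)) (out : List (List Int)) : Decidable (Spec_lowestBlocks piece out) := by unfold Spec_lowestBlocks; infer_instance

-- ===== CLAIM (what is proved, stated in full; the proofs are below) =====
def Claim_equal_lowestBlocks : Prop := ∀ (piece : List (List Int)), Dom_lowestBlocks piece → Pre_lowestBlocks piece → Spec_lowestBlocks piece (lowestBlocks piece)

-- ===== LEMMAS AND PROOFS =====

-- the common characterisation: index of the bottom-most row whose c-th entry is non-zero
def lastHit : List (List Int) → Int → Int → Option Int
  | [], _, _ => none
  | row :: rest, s, c =>
      match lastHit rest (s + 1) c with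
      | some r => some r
      | none => if 0 ≤ c ∧ c < (row.length : Int) ∧ PySem.List.pyGetD row c 0 ≠ 0
                then some s else none

theorem pyGetD_cons_of_pos (x : Int) (xs : List Int) (i : Int)
    (h1 : 1 ≤ i) (h2 : i < (xs.length : Int) + 1) :
    PySem.List.pyGetD (x :: xs) i 0 = PySem.List.pyGetD xs (i - 1) 0 := by
  rw [PySem.List.pyGetD_eq_getElem _ _ (by omega) (by simp; omega),
      PySem.List.pyGetD_eq_getElem _ _ (by omega) (by omega)]
  have ht : i.toNat = (i - 1).toNat + 1 := by omega
  apply Option.some.inj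
  rw [← List.getElem?_eq_getElem, ← List.getElem?_eq_getElem, ht, List.getElem?_cons_succ]

theorem pyGetD_append_left (xs ys : List (List Int)) (i : Int)
    (h1 : 0 ≤ i) (h2 : i < (xs.length : Int)) :
    PySem.List.pyGetD (xs ++ ys) i ([] : List Int) = PySem.List.pyGetD xs i [] := by
  rw [PySem.List.pyGetD_eq_getElem _ _ h1 (by simp; omega),
      PySem.List.pyGetD_eq_getElem _ _ h1 h2]
  exact List.getElem_append_left (by omega)

theorem lastHit_append_singleton (xs : List (List Int)) (row : List Int) (s c : Int) :
    lastHit (xs ++ [row]) s c =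
      (if 0 ≤ c ∧ c < (row.length : Int) ∧ PySem.List.pyGetD row c 0 ≠ 0
       then some (s + xs.length) else lastHit xs s c) := by
  induction xs generalizing s with
  | nil =>
      simp only [List.nil_append, lastHit]
      split <;> simp
  | cons x xs ih =>
      simp only [List.cons_append, lastHit, ih (s + 1)]
      by_cases h : 0 ≤ c ∧ c < (row.length : Int) ∧ PySem.List.pyGetD row c 0 ≠ 0
      · rw [if_pos h]
        rw [if_pos h]
        show some (s + 1 + (xs.length : Int)) = some (s + ((x :: xs).length : Int))
        congr 1
        simp only [List.length_cons]
        push_cast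
        ring
      · rw [if_neg h]
        rw [if_neg h]

-- B's inner fold: what the dict holds after processing one row
theorem inner_get? (row : List Int) (r : Int) (d : PySem.Dict Int Int) (s q : Int) :
    ((PySem.List.enumerate row s).foldl (fun d cv =>
        if cv.2 ≠ 0 then d.insert cv.1 r else d) d).get? q =
      (if s ≤ q ∧ q < s + (row.length : Int) ∧ PySem.List.pyGetD row (q - s) 0 ≠ 0
       then some r else d.get? q) := by
  induction row generalizing s d with
  | nil =>
      rw [PySem.List.enumerate_nil]
      simp only [List.foldl_nil, List.length_nil]
      rw [if_neg (by rintro ⟨h1, h2, -⟩; omega)]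
  | cons x xs ih =>
      rw [PySem.List.enumerate_cons, List.foldl_cons, ih _ (s + 1)]
      by_cases hq : q = s
      · subst hq
        rw [if_neg (by rintro ⟨h1, -, -⟩; omega)]
        simp only [ne_eq, sub_self, PySem.List.pyGetD_zero_cons]
        by_cases hx : x = 0
        · rw [if_neg (by simp [hx]), if_neg (by rintro ⟨-, -, h3⟩; exact h3 hx)]
        · rw [if_pos hx, PySem.Dict.get?_insert, if_pos rfl,
              if_pos ⟨le_refl q, by simp only [List.length_cons]; push_cast; omega, hx⟩]
      · have hcond : (s + 1 ≤ q ∧ q < s + 1 + (xs.length : Int) ∧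
              PySem.List.pyGetD xs (q - (s + 1)) 0 ≠ 0)
            ↔ (s ≤ q ∧ q < s + ((x :: xs).length : Int) ∧
              PySem.List.pyGetD (x :: xs) (q - s) 0 ≠ 0) := by
          simp only [List.length_cons]
          constructor
          · rintro ⟨h1, h2, h3⟩
            refine ⟨by omega, by push_cast; omega, ?_⟩
            rw [pyGetD_cons_of_pos _ _ _ (by omega) (by omega)]
            have he : q - s - 1 = q - (s + 1) := by ring
            rw [he]; exact h3
          · rintro ⟨h1, h2, h3⟩
            have h1' : s + 1 ≤ q := by omega
            refine ⟨h1', by push_cast at h2 ⊢; omega, ?_⟩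
            rw [pyGetD_cons_of_pos _ _ _ (by omega) (by push_cast at h2 ⊢; omega)] at h3
            have he : q - s - 1 = q - (s + 1) := by ring
            rw [he] at h3; exact h3
        have hget : (if x ≠ 0 then d.insert s r else d).get? q = d.get? q := by
          split
          · rw [PySem.Dict.get?_insert, if_neg hq]
          · rfl
        simp only [ne_eq] at hget ⊢
        rw [hget]
        by_cases hA : s + 1 ≤ q ∧ q < s + 1 + (xs.length : Int) ∧
            PySem.List.pyGetD xs (q - (s + 1)) 0 ≠ 0
        · rw [if_pos hA, if_pos (hcond.mp hA)]
        · rw [if_neg hA, if_neg (fun hB => hA (hcond.mpr hB))]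

-- B's outer fold computes lastHit
theorem outer_get? (piece : List (List Int)) (d : PySem.Dict Int Int) (s q : Int) :
    ((PySem.List.enumerate piece s).foldl (fun d rr =>
        (PySem.List.enumerate rr.2 0).foldl (fun d cv =>
          if cv.2 ≠ 0 then d.insert cv.1 rr.1 else d) d) d).get? q =
      (match lastHit piece s q with
       | some r => some r
       | none => d.get? q) := by
  induction piece generalizing s d with
  | nil => simp [PySem.List.enumerate_nil, lastHit]
  | cons row rest ih =>
      rw [PySem.List.enumerate_cons, List.foldl_cons, ih _ (s + 1)]
      simp only [lastHit]
      cases lastHit rest (s + 1) q with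
      | some r => rfl
      | none =>
          simp only []
          rw [inner_get? row s _ 0 q]
          simp only [zero_add, sub_zero]
          split_ifs with hC <;> rfl

theorem find?_congr_mem {α : Type} (l : List α) (p q : α → Bool)
    (h : ∀ x ∈ l, p x = q x) : l.find? p = l.find? q := by
  induction l with
  | nil => rfl
  | cons x xs ih =>
      rw [List.find?_cons, List.find?_cons, h x (List.mem_cons_self)]
      cases q x with
      | true => rfl
      | false => exact ih (fun y hy => h y (List.mem_cons_of_mem _ hy))

-- A's inner countdown find? computes lastHit, when every row is long enough at column c
theorem find?_countdown (piece : List (List Int)) (c : Int)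
    (hc : 0 ≤ c) (hlen : ∀ row ∈ piece, c < (row.length : Int)) :
    (PySem.List.pyRange ((piece.length : Int) - 1) (-1) (-1)).find?
        (fun lowest => PySem.List.pyGetD (PySem.List.pyGetD piece lowest []) c 0 != 0) =
      lastHit piece 0 c := by
  induction piece using List.reverseRecOn with
  | nil => simp [PySem.List.pyRange_neg_one_eq_nil, lastHit]
  | append_singleton xs row ih =>
      have hlt : (-1 : Int) < ((xs ++ [row]).length : Int) - 1 := by simp; omega
      rw [PySem.List.pyRange_neg_one_cons hlt, List.find?_cons]
      have hidx : ((xs ++ [row]).length : Int) - 1 = (xs.length : Int) := by simp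
      have hrowget : PySem.List.pyGetD (xs ++ [row]) ((xs.length : Int)) [] = row := by
        rw [PySem.List.pyGetD_eq_getElem _ _ (by omega) (by simp)]
        simp
      rw [hidx, lastHit_append_singleton]
      simp only [hrowget]
      have hrlen : c < (row.length : Int) := hlen row (by simp)
      by_cases hz : PySem.List.pyGetD row c 0 = 0
      · have hb : (PySem.List.pyGetD row c 0 != 0) = false := by simp [hz]
        simp only [hb]
        rw [if_neg (by rintro ⟨-, -, h3⟩; exact h3 hz)]
        have hagree : ∀ lowest ∈ PySem.List.pyRange ((xs.length : Int) - 1) (-1) (-1),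
            (PySem.List.pyGetD (PySem.List.pyGetD (xs ++ [row]) lowest []) c 0 != 0)
              = (PySem.List.pyGetD (PySem.List.pyGetD xs lowest []) c 0 != 0) := by
          intro lowest hmem
          rw [PySem.List.mem_pyRange_neg_one] at hmem
          rw [pyGetD_append_left xs [row] lowest (by omega) (by omega)]
        rw [find?_congr_mem _ _ _ hagree]
        exact ih (fun r hr => hlen r (by simp [hr]))
      · have hb : (PySem.List.pyGetD row c 0 != 0) = true := by simp [hz]
        simp only [hb]
        rw [if_pos ⟨hc, hrlen, hz⟩]
        simp

-- the break-loop appends the first hit of the countdown scan (if any)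
theorem lowestLoop_eq (piece : List (List Int)) (c : Int) (acc : List (List Int))
    (l : List Int) :
    lowestLoop piece c acc l =
      acc ++ ((l.find? (fun lowest =>
          PySem.List.pyGetD (PySem.List.pyGetD piece lowest []) c 0 != 0)).map
        (fun r => [r, c])).toList := by
  induction l with
  | nil => simp [lowestLoop]
  | cons x xs ih =>
      rw [lowestLoop, List.find?_cons]
      by_cases hx : (PySem.List.pyGetD (PySem.List.pyGetD piece x []) c 0 != 0) = true
      · simp [hx]
      · simp only [Bool.not_eq_true] at hx
        simp [hx, ih]

theorem flatMap_toList {α β : Type} (f : α → Option β) (l : List α) :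
    l.flatMap (fun a => (f a).toList) = l.filterMap f := by
  induction l with
  | nil => rfl
  | cons x xs ih => cases hx : f x <;> simp [hx, ih]

-- ===== VERDICT (by name: the statement is the Claim_ definition above) =====
theorem match_option_id (o : Option Int) :
    (match o with | some r => some r | none => (none : Option Int)) = o := by
  cases o <;> rfl

theorem lowestBlocks_spec : Claim_equal_lowestBlocks := by
  intro piece _hdom hpre
  obtain ⟨hne, hall⟩ := hpre
  unfold Spec_lowestBlocks lowestBlocks lowestBlocks_alt
  dsimp only
  simp only [lowestLoop_eq]
  rw [PySem.List.foldl_append_eq_flatMap, List.nil_append, flatMap_toList]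
  refine Eq.trans
    (b := (PySem.List.pyRange 0 ((PySem.List.pyGetD piece 0 []).length : Int) 1).filterMap
      (fun c => (lastHit piece 0 c).map (fun r => [r, c])))
    ?hA (Eq.symm ?hB)
  case hA =>
    rw [List.length_map, PySem.List.length_pyRange_one]
    have h2 : ((((PySem.List.pyGetD piece 0 []).length : Int) - 0).toNat : Int)
        = ((PySem.List.pyGetD piece 0 []).length : Int) := by omega
    rw [h2]
    refine List.filterMap_congr ?_
    intro c hc
    rw [PySem.List.mem_pyRange_one] at hc
    rw [PySem.List.pyGetD_map_pyRange_of_nonneg _ _ _ _ hc.1 hc.2, List.length_map]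
    rw [find?_countdown piece c hc.1 ?_]
    intro row hrow
    have := hall row hrow
    omega
  case hB =>
    refine List.filterMap_congr ?_
    intro c _
    rw [outer_get? piece PySem.Dict.empty 0 c, PySem.Dict.get?_empty, match_option_id]
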